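-- pv_equiv track=rewrite | github.com/chaeeerish/Algorithm-Python | 사이트별/코딜리티/Counting Elements/FrogRiverOne.py | solution
-- ===== SOURCE A (Python) =====
-- import math
--
-- def solution(X, A):
--     result = set([n for n in range(1, X + 1)])
--
--     left = 0
--     right = len(A)
--     time = math.inf
--     while left < right:
--         mid = (left + right) // 2
--         if set(A[:mid + 1]) == result:
--             right = mid
--             time = min(time, mid)
--         else:
--             left = mid + 1
--
--     if time == math.inf:
--         return -1
--     return time
-- ===== SOURCE B (Python) =====
-- def solution(X, A):
--     target = set(range(1, X + 1))
--     seen = set()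
--     for i, a in enumerate(A):
--         seen.add(a)
--         if seen == target:
--             return i
--     return -1
-- ===== Notes on version B (the rewrite author's own statement) =====
-- stated objective: faster
-- what changed: Replaces the binary search that rebuilds set(A[:mid+1]) at every probe (O((n+X) log n)) with a single left-to-right pass growing one set and returning the first index where it equals {1..X}.
-- intended difference: On inputs where some prefix set equals {1..X} but A's bisection (over a non-monotonic predicate, since later out-of-range values break set equality) never probes inside the window of valid indices, A returns -1 while B returns the earliest such index, which is the intended crossing time. — e.g. on solution(1, [1, 2]): A returns -1, B returns 0
import Mathlib
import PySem

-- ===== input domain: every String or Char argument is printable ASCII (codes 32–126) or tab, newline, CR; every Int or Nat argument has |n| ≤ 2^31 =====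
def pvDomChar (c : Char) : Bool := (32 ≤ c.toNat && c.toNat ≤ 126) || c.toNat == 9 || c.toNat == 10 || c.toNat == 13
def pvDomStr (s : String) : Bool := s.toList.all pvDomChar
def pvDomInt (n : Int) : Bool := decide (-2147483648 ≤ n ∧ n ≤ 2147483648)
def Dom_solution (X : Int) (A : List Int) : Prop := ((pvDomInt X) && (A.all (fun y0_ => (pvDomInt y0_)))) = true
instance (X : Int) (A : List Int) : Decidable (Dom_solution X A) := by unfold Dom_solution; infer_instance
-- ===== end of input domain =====

-- B replaces A's binary search (which rebuilds set(A[:mid+1]) at each probe) with one linear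
-- pass growing a single set; on the D_ inputs below A's search misses the answer and B fixes it.

-- ===== PORT A =====
-- while left < right: mid = (left+right)//2; if set(A[:mid+1]) == result: right = mid; time = min(time, mid) else: left = mid+1
-- time : Option Int models math.inf as none (min(inf, mid) = mid); the fuel argument only
-- bounds the iteration count ((right-left).toNat at entry suffices, each step shrinks it).
def solutionLoop (A : List Int) (R : PySem.Set Int) : Nat → Int → Int → Option Int → Option Int
  | 0, _, _, time => time
  | fuel + 1, left, right, time =>
    if left < right then
      let mid := PySem.Int.floordiv (left + right) 2
      if PySem.Set.equal (PySem.Set.ofList (PySem.List.slice A none (some (mid + 1)))) R then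
        solutionLoop A R fuel left mid (some (match time with | none => mid | some t => min t mid))
      else
        solutionLoop A R fuel (mid + 1) right time
    else time

-- result = set([n for n in range(1, X + 1)]); the range is duplicate-free, so set() of it IS
-- the list itself (PySem.Set.ofList_eq_self_of_nodup, PySem.List.nodup_pyRange_one) — written
-- directly so that building it stays linear in X
def solution (X : Int) (A : List Int) : Int :=
  let result : PySem.Set Int := PySem.List.pyRange 1 (X + 1) 1
  match solutionLoop A result A.length 0 (A.length : Int) none with
  | none => -1
  | some t => t

-- ===== PORT B =====
-- for i, a in enumerate(A): seen.add(a); if seen == target: return i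
def solutionAltGo (target : PySem.Set Int) : PySem.Set Int → Int → List Int → Int
  | _, _, [] => -1
  | seen, i, a :: rest =>
    let seen' := PySem.Set.add seen a
    if PySem.Set.equal seen' target then i else solutionAltGo target seen' (i + 1) rest

-- target = set(range(1, X + 1)): again the duplicate-free range is its own set
def solution_alt (X : Int) (A : List Int) : Int :=
  solutionAltGo (PySem.List.pyRange 1 (X + 1) 1) PySem.Set.empty 0 A

-- ===== PRECONDITION & SPEC =====
-- "index k's prefix covers exactly {1..X}": all of A[:k+1] lies in 1..X and every value 1..X occurs there
-- (the Bool form short-circuits: the bound X ≤ k+1, itself forced by coverage, is checked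
-- before the range is ever materialised, so deciding D_ stays cheap for huge X)
def pvCovers (X : Int) (A : List Int) (k : Nat) : Prop :=
  ((A.take (k + 1)).all (fun x => decide (1 ≤ x ∧ x ≤ X))
    && (decide (X ≤ (k : Int) + 1)
      && (PySem.List.pyRange 1 (X + 1) 1).all (fun v => decide (v ∈ A.take (k + 1))))) = true

-- the midpoint sequence a bisection of [l,n) probes while every probe answers "go right"
def pvProbes : Nat → Int → Int → List Int
  | 0, _, _ => []
  | fuel + 1, l, n =>
    if l < n then
      PySem.Int.floordiv (l + n) 2 :: pvProbes fuel (PySem.Int.floordiv (l + n) 2 + 1) n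
    else []

-- On inputs where some prefix set equals {1..X} but A's bisection (over a non-monotonic
-- predicate, since later out-of-range values break set equality) never probes inside the
-- window of valid indices, A returns -1 while B returns the earliest such index, which is
-- the intended crossing time.
def D_solution (X : Int) (A : List Int) : Prop :=
  (∃ k ∈ List.range A.length, pvCovers X A k) ∧
    ∀ m ∈ pvProbes A.length 0 (A.length : Int), ¬ pvCovers X A m.toNat

instance (X : Int) (A : List Int) : Decidable (D_solution X A) := by
  unfold D_solution pvCovers; infer_instance

def Spec_solution (X : Int) (A : List Int) (out : Int) : Prop := ¬ D_solution X A → out = solution_alt X A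
instance (X : Int) (A : List Int) (out : Int) : Decidable (Spec_solution X A out) := by unfold Spec_solution; infer_instance

def pvDiffWitness_solution : Int × List Int := (1, [1, 2])
def pvDiffWitnessOut_solution : Int × Int := (-1, 0)

-- ===== CLAIM (what is proved, stated in full; the proofs are below) =====
def Claim_unchanged_solution : Prop := ∀ (X : Int) (A : List Int), Dom_solution X A → Spec_solution X A (solution X A)
def Claim_changed_solution : Prop := Dom_solution (pvDiffWitness_solution.1) (pvDiffWitness_solution.2) ∧ D_solution (pvDiffWitness_solution.1) (pvDiffWitness_solution.2) ∧ solution (pvDiffWitness_solution.1) (pvDiffWitness_solution.2) = pvDiffWitnessOut_solution.1 ∧ solution_alt (pvDiffWitness_solution.1) (pvDiffWitness_solution.2) = pvDiffWitnessOut_solution.2 ∧ pvDiffWitnessOut_solution.1 ≠ pvDiffWitnessOut_solution.2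
def Claim_exact_solution : Prop := ∀ (X : Int) (A : List Int), Dom_solution X A → D_solution X A → solution X A ≠ solution_alt X A

-- ===== LEMMAS AND PROOFS =====

-- "the first k+1 elements of A, as a set, equal {1..X}" — the predicate A's probe tests
def pvP (X : Int) (A : List Int) (k : Nat) : Prop := ∀ x : Int, x ∈ A.take (k + 1) ↔ (1 ≤ x ∧ x ≤ X)

-- "the first mid+1 elements all lie in 1..X" — the antitone part of pvP
def pvSafe (X : Int) (A : List Int) (mid : Int) : Prop := ∀ x ∈ A.take (mid.toNat + 1), 1 ≤ x ∧ x ≤ X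

-- set(range(1, X+1)) is the range list itself
theorem pvSetRange (X : Int) :
    (PySem.List.pyRange 1 (X + 1) 1 : PySem.Set Int)
      = PySem.Set.ofList (PySem.List.pyRange 1 (X + 1) 1) :=
  (PySem.Set.ofList_eq_self_of_nodup _ (PySem.List.nodup_pyRange_one 1 (X + 1))).symm

theorem pvCovers_iff (X : Int) (A : List Int) (k : Nat) : pvCovers X A k ↔ pvP X A k := by
  unfold pvCovers
  simp only [Bool.and_eq_true, List.all_eq_true, decide_eq_true_eq]
  constructor
  · rintro ⟨h1, -, h2⟩ x
    exact ⟨h1 x, fun hx => h2 x (by rw [PySem.List.mem_pyRange_one]; omega)⟩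
  · intro h
    refine ⟨fun x hx => (h x).1 hx, ?_, fun v hv => (h v).2 (by rw [PySem.List.mem_pyRange_one] at hv; omega)⟩
    -- coverage pigeonholes X distinct values into a list of length ≤ k+1
    have hsub : Finset.Icc (1 : Int) X ⊆ (A.take (k + 1)).toFinset := by
      intro v hv
      rw [Finset.mem_Icc] at hv
      exact List.mem_toFinset.2 ((h v).2 hv)
    have hcard := Finset.card_le_card hsub
    have h1 : (Finset.Icc (1 : Int) X).card = (X + 1 - 1).toNat := Int.card_Icc 1 X
    have h2 : (A.take (k + 1)).toFinset.card ≤ (A.take (k + 1)).length := List.toFinset_card_le _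
    have h3 : (A.take (k + 1)).length ≤ k + 1 := by simp
    omega

theorem pvMemTakeMono (A : List Int) {m m' : Nat} (h : m ≤ m') {x : Int}
    (hx : x ∈ A.take m) : x ∈ A.take m' := by
  have hm : x ∈ (A.take m').take m := by rwa [List.take_take, Nat.min_eq_left h]
  exact List.take_subset _ _ hm

theorem pvSafe_mono (X : Int) (A : List Int) {m m' : Int} (h : m ≤ m')
    (hs : pvSafe X A m') : pvSafe X A m := by
  intro x hx
  exact hs x (pvMemTakeMono A (by omega) hx)

-- A's probe test, as the predicate pvP
theorem pvTest_iff (X : Int) (A : List Int) (mid : Int) (hm : 0 ≤ mid) :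
    (PySem.Set.equal (PySem.Set.ofList (PySem.List.slice A none (some (mid + 1))))
        (PySem.Set.ofList (PySem.List.pyRange 1 (X + 1) 1)) = true)
      ↔ pvP X A mid.toNat := by
  have hcast : mid + 1 = ((mid.toNat + 1 : Nat) : Int) := by omega
  rw [hcast, PySem.List.slice_to_natCast, PySem.Set.equal_iff]
  constructor
  · intro h x
    have hx := h x
    rw [PySem.Set.mem_ofList, PySem.Set.mem_ofList, PySem.List.mem_pyRange_one] at hx
    rw [hx]; omega
  · intro h x
    rw [PySem.Set.mem_ofList, PySem.Set.mem_ofList, PySem.List.mem_pyRange_one, h x]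
    omega

-- B's probe test, as the predicate pvP
theorem pvTestB_iff (X : Int) (A : List Int) (pref : List Int) (a : Int) (rest : List Int)
    (hA : A = pref ++ a :: rest) :
    (PySem.Set.equal (PySem.Set.add (PySem.Set.ofList pref) a)
        (PySem.Set.ofList (PySem.List.pyRange 1 (X + 1) 1)) = true)
      ↔ pvP X A pref.length := by
  have htake : A.take (pref.length + 1) = pref ++ [a] := by
    rw [hA]; simp [List.take_append]
  rw [← PySem.Set.ofList_append_singleton, PySem.Set.equal_iff]
  constructor
  · intro h x
    have hx := h x
    rw [PySem.Set.mem_ofList, PySem.Set.mem_ofList, PySem.List.mem_pyRange_one] at hx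
    rw [htake, hx]; omega
  · intro h x
    rw [PySem.Set.mem_ofList, PySem.Set.mem_ofList, PySem.List.mem_pyRange_one,
      ← htake, h x]
    omega

-- given the least covering index cn, the probe predicate factors as "cn ≤ mid and safe"
theorem pvP_iff (X : Int) (A : List Int) (cn : Nat) (hpc : pvP X A cn)
    (hmin : ∀ k < cn, ¬ pvP X A k) (mid : Int) (hm : 0 ≤ mid) :
    pvP X A mid.toNat ↔ ((cn : Int) ≤ mid ∧ pvSafe X A mid) := by
  constructor
  · intro hp
    refine ⟨?_, fun x hx => (hp x).1 hx⟩
    by_contra hlt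
    exact hmin mid.toNat (by omega) hp
  · rintro ⟨hle, hsafe⟩ x
    constructor
    · exact hsafe x
    · intro hx
      exact pvMemTakeMono A (by omega) ((hpc x).2 hx)

theorem pvProbes_mem : ∀ (fuel : Nat) (l n m : Int), m ∈ pvProbes fuel l n → l ≤ m ∧ m < n := by
  intro fuel
  induction fuel with
  | zero => intro l n m hm; simp [pvProbes] at hm
  | succ fuel ih =>
    intro l n m hm
    rw [pvProbes] at hm
    by_cases hlt : l < n
    · rw [if_pos hlt] at hm
      have hb := PySem.Int.floordiv_two_mid_bounds (le_of_lt hlt)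
      have hmr : PySem.Int.floordiv (l + n) 2 < n := by
        rw [PySem.Int.floordiv_lt_iff_lt_mul (by omega)]; omega
      rcases List.mem_cons.1 hm with h | h
      · omega
      · have := ih _ _ _ h; omega
    · rw [if_neg hlt] at hm; cases hm

-- dead phase of A's loop: every probe fails, time stays at infinity
theorem pvDead (X : Int) (A : List Int) :
    ∀ (fuel : Nat) (l r : Int), (r - l).toNat ≤ fuel →
      (∀ mid : Int, l ≤ mid → mid < r →
        ¬ PySem.Set.equal (PySem.Set.ofList (PySem.List.slice A none (some (mid + 1))))
          (PySem.Set.ofList (PySem.List.pyRange 1 (X + 1) 1)) = true) →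
      solutionLoop A (PySem.Set.ofList (PySem.List.pyRange 1 (X + 1) 1)) fuel l r none = none := by
  intro fuel
  induction fuel with
  | zero => intro l r _ _; rw [solutionLoop]
  | succ fuel ih =>
    intro l r hfuel hf
    rw [solutionLoop]
    by_cases hlt : l < r
    · rw [if_pos hlt]
      have hml : l ≤ PySem.Int.floordiv (l + r) 2 := (PySem.Int.floordiv_two_mid_bounds (le_of_lt hlt)).1
      have hmr : PySem.Int.floordiv (l + r) 2 < r := by
        rw [PySem.Int.floordiv_lt_iff_lt_mul (by omega)]; omega
      rw [if_neg (hf _ hml hmr)]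
      exact ih _ r (by omega) (fun m hm1 hm2 => hf m (by omega) hm2)
    · rw [if_neg hlt]

-- hit phase: once a probe succeeded the loop converges to the least covering index
theorem pvHit (X : Int) (A : List Int) (cn : Nat) (hpc : pvP X A cn)
    (hmin : ∀ k < cn, ¬ pvP X A k) :
    ∀ (fuel : Nat) (l r v : Int), (r - l).toNat ≤ fuel →
      0 ≤ l → l ≤ (cn : Int) → (cn : Int) ≤ r → v = r → pvSafe X A r →
      solutionLoop A (PySem.Set.ofList (PySem.List.pyRange 1 (X + 1) 1)) fuel l r (some v)
        = some (cn : Int) := by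
  intro fuel
  induction fuel with
  | zero =>
    intro l r v hfuel h0 hlc hcr hvr _
    rw [solutionLoop]
    have : v = (cn : Int) := by omega
    rw [this]
  | succ fuel ih =>
    intro l r v hfuel h0 hlc hcr hvr hsafe
    rw [solutionLoop]
    by_cases hlt : l < r
    · rw [if_pos hlt]
      have hml : l ≤ PySem.Int.floordiv (l + r) 2 := (PySem.Int.floordiv_two_mid_bounds (le_of_lt hlt)).1
      have hmr : PySem.Int.floordiv (l + r) 2 < r := by
        rw [PySem.Int.floordiv_lt_iff_lt_mul (by omega)]; omega
      set mid := PySem.Int.floordiv (l + r) 2 with hmid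
      have hiff : (PySem.Set.equal (PySem.Set.ofList (PySem.List.slice A none (some (mid + 1))))
          (PySem.Set.ofList (PySem.List.pyRange 1 (X + 1) 1)) = true)
            ↔ ((cn : Int) ≤ mid ∧ pvSafe X A mid) := by
        rw [pvTest_iff X A mid (by omega), pvP_iff X A cn hpc hmin mid (by omega)]
      by_cases hcm : (cn : Int) ≤ mid
      · have hsafem : pvSafe X A mid := pvSafe_mono X A (by omega) hsafe
        rw [if_pos (hiff.2 ⟨hcm, hsafem⟩)]
        have hmatch : (match some v with | none => mid | some t => min t mid) = min v mid := rfl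
        rw [hmatch, min_eq_right (show mid ≤ v by omega)]
        exact ih l mid mid (by omega) h0 hlc hcm rfl hsafem
      · rw [if_neg (by rw [hiff]; intro h; exact hcm h.1)]
        exact ih (mid + 1) r v (by omega) (by omega) (by omega) hcr hvr hsafe
    · rw [if_neg hlt]
      have : v = (cn : Int) := by omega
      rw [this]

-- the whole search, miss case: no probe of the all-false trajectory hits the window, A ends at -1
theorem pvTrajMiss (X : Int) (A : List Int) (cn : Nat) (hpc : pvP X A cn)
    (hmin : ∀ k < cn, ¬ pvP X A k) :
    ∀ (fuel : Nat) (l : Int), ((A.length : Int) - l).toNat ≤ fuel → 0 ≤ l →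
      (∀ m ∈ pvProbes fuel l (A.length : Int), ¬ ((cn : Int) ≤ m ∧ pvSafe X A m)) →
      solutionLoop A (PySem.Set.ofList (PySem.List.pyRange 1 (X + 1) 1)) fuel l (A.length : Int) none = none := by
  intro fuel
  induction fuel with
  | zero => intro l _ _ _; rw [solutionLoop]
  | succ fuel ih =>
    intro l hfuel h0 hmiss
    rw [solutionLoop]
    by_cases hlt : l < (A.length : Int)
    · rw [if_pos hlt]
      have hml : l ≤ PySem.Int.floordiv (l + A.length) 2 :=
        (PySem.Int.floordiv_two_mid_bounds (le_of_lt hlt)).1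
      have hmr : PySem.Int.floordiv (l + (A.length : Int)) 2 < (A.length : Int) := by
        rw [PySem.Int.floordiv_lt_iff_lt_mul (by omega)]; omega
      set mid := PySem.Int.floordiv (l + (A.length : Int)) 2 with hmid
      have hmemhead : mid ∈ pvProbes (fuel + 1) l (A.length : Int) := by
        simp only [pvProbes, if_pos hlt, ← hmid]
        exact List.mem_cons_self ..
      have hiff : (PySem.Set.equal (PySem.Set.ofList (PySem.List.slice A none (some (mid + 1))))
          (PySem.Set.ofList (PySem.List.pyRange 1 (X + 1) 1)) = true)
            ↔ ((cn : Int) ≤ mid ∧ pvSafe X A mid) := by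
        rw [pvTest_iff X A mid (by omega), pvP_iff X A cn hpc hmin mid (by omega)]
      rw [if_neg (by rw [hiff]; exact hmiss mid hmemhead)]
      by_cases hcm : (cn : Int) ≤ mid
      · -- the probe overshot the window: everything to the right is dead
        have hsafe : ¬ pvSafe X A mid := fun hs => hmiss mid hmemhead ⟨hcm, hs⟩
        exact pvDead X A fuel (mid + 1) (A.length : Int) (by omega) (by
          intro m hm1 hm2
          rw [pvTest_iff X A m (by omega), pvP_iff X A cn hpc hmin m (by omega)]
          rintro ⟨-, hs⟩
          exact hsafe (pvSafe_mono X A (by omega) hs))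
      · exact ih (mid + 1) (by omega) (by omega) (by
          intro m hm
          exact hmiss m (by simp only [pvProbes, if_pos hlt, ← hmid]; exact List.mem_cons_of_mem _ hm))
    · rw [if_neg hlt]

-- the whole search, hit case: some probe of the all-false trajectory hits the window, A finds cn
theorem pvTrajHit (X : Int) (A : List Int) (cn : Nat) (hpc : pvP X A cn)
    (hmin : ∀ k < cn, ¬ pvP X A k) :
    ∀ (fuel : Nat) (l : Int), ((A.length : Int) - l).toNat ≤ fuel → 0 ≤ l → l ≤ (cn : Int) →
      (∃ m ∈ pvProbes fuel l (A.length : Int), (cn : Int) ≤ m ∧ pvSafe X A m) →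
      solutionLoop A (PySem.Set.ofList (PySem.List.pyRange 1 (X + 1) 1)) fuel l (A.length : Int) none
        = some (cn : Int) := by
  intro fuel
  induction fuel with
  | zero =>
    intro l _ _ _ hhit
    simp only [pvProbes] at hhit
    obtain ⟨m, hm, -⟩ := hhit
    cases hm
  | succ fuel ih =>
    intro l hfuel h0 hlc hhit
    by_cases hlt : l < (A.length : Int)
    · rw [solutionLoop, if_pos hlt]
      have hml : l ≤ PySem.Int.floordiv (l + A.length) 2 :=
        (PySem.Int.floordiv_two_mid_bounds (le_of_lt hlt)).1
      have hmr : PySem.Int.floordiv (l + (A.length : Int)) 2 < (A.length : Int) := by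
        rw [PySem.Int.floordiv_lt_iff_lt_mul (by omega)]; omega
      set mid := PySem.Int.floordiv (l + (A.length : Int)) 2 with hmid
      have hiff : (PySem.Set.equal (PySem.Set.ofList (PySem.List.slice A none (some (mid + 1))))
          (PySem.Set.ofList (PySem.List.pyRange 1 (X + 1) 1)) = true)
            ↔ ((cn : Int) ≤ mid ∧ pvSafe X A mid) := by
        rw [pvTest_iff X A mid (by omega), pvP_iff X A cn hpc hmin mid (by omega)]
      simp only [pvProbes, if_pos hlt, ← hmid] at hhit
      by_cases hcond : (cn : Int) ≤ mid ∧ pvSafe X A mid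
      · rw [if_pos (hiff.2 hcond)]
        exact pvHit X A cn hpc hmin fuel l mid mid (by omega) h0 hlc hcond.1 rfl hcond.2
      · rw [if_neg (by rw [hiff]; exact hcond)]
        obtain ⟨m, hm, hc⟩ := hhit
        rcases List.mem_cons.1 hm with h | h
        · exact absurd (h ▸ hc) hcond
        · have hbnd := pvProbes_mem fuel _ _ m h
          by_cases hcm : (cn : Int) ≤ mid
          · -- mid overshot: no later probe can be safe — contradiction with the hit
            exact absurd hc (fun hcc =>
              (fun hs => hcond ⟨hcm, pvSafe_mono X A (by omega) hcc.2⟩) hcc.2)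
          · exact ih (mid + 1) (by omega) (by omega) (by omega) ⟨m, h, hc⟩
    · simp only [pvProbes, if_neg hlt] at hhit
      obtain ⟨m, hm, -⟩ := hhit
      cases hm

-- B's scan when no prefix ever covers {1..X}
theorem pvAltNone (X : Int) (A : List Int) (hall : ∀ k : Nat, k < A.length → ¬ pvP X A k) :
    ∀ (rest pref : List Int), A = pref ++ rest →
      solutionAltGo (PySem.Set.ofList (PySem.List.pyRange 1 (X + 1) 1))
        (PySem.Set.ofList pref) (pref.length : Int) rest = -1 := by
  intro rest
  induction rest with
  | nil => intro pref _; rw [solutionAltGo]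
  | cons a rest ih =>
    intro pref hA
    rw [solutionAltGo]
    have hlen : pref.length < A.length := by rw [hA]; simp
    rw [if_neg (by
      rw [pvTestB_iff X A pref a rest hA]
      exact hall pref.length hlen)]
    have := ih (pref ++ [a]) (by rw [hA]; simp)
    simpa [PySem.Set.ofList_append_singleton, add_comm] using this

-- B's scan returns the least covering index
theorem pvAltSome (X : Int) (A : List Int) (cn : Nat) (hpc : pvP X A cn)
    (hmin : ∀ k < cn, ¬ pvP X A k) :
    ∀ (rest pref : List Int), A = pref ++ rest → pref.length ≤ cn → cn < A.length →
      solutionAltGo (PySem.Set.ofList (PySem.List.pyRange 1 (X + 1) 1))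
        (PySem.Set.ofList pref) (pref.length : Int) rest = (cn : Int) := by
  intro rest
  induction rest with
  | nil =>
    intro pref hA hle hlt
    rw [hA] at hlt; simp at hlt; omega
  | cons a rest ih =>
    intro pref hA hle hlt
    rw [solutionAltGo]
    by_cases heq : pref.length = cn
    · rw [if_pos (by rw [pvTestB_iff X A pref a rest hA, heq]; exact hpc)]
      rw [heq]
    · rw [if_neg (by
        rw [pvTestB_iff X A pref a rest hA]
        exact hmin pref.length (by omega))]
      have := ih (pref ++ [a]) (by rw [hA]; simp) (by simp; omega) hlt
      simpa [PySem.Set.ofList_append_singleton, add_comm] using this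

-- ===== VERDICT (by name: the statements are the Claim_ definitions above) =====
theorem solution_spec : Claim_unchanged_solution := by
  intro X A _hDom hnD
  show solution X A = solution_alt X A
  by_cases hex : ∃ k ∈ List.range A.length, pvCovers X A k
  · -- a covering prefix exists: take the least one
    have hex' : ∃ k : Nat, k < A.length ∧ pvCovers X A k := by
      obtain ⟨k, hk, hc⟩ := hex; exact ⟨k, List.mem_range.1 hk, hc⟩
    haveI : DecidablePred (fun k => k < A.length ∧ pvCovers X A k) := fun k => by
      unfold pvCovers; infer_instance
    set cn := Nat.find hex' with hcn
    obtain ⟨hcnlt, hcnc⟩ := Nat.find_spec hex'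
    have hpc : pvP X A cn := (pvCovers_iff X A cn).1 hcnc
    have hmin : ∀ k < cn, ¬ pvP X A k := by
      intro k hk hp
      exact Nat.find_min hex' hk ⟨by omega, (pvCovers_iff X A k).2 hp⟩
    -- ¬D_ together with the existing window forces a probe inside the window
    have hprobe : ∃ m ∈ pvProbes A.length 0 (A.length : Int), (cn : Int) ≤ m ∧ pvSafe X A m := by
      unfold D_solution at hnD
      push Not at hnD
      obtain ⟨m, hm, hc⟩ := hnD hex
      have hb := pvProbes_mem A.length 0 _ m hm
      have := (pvP_iff X A cn hpc hmin m (by omega)).1 ((pvCovers_iff X A m.toNat).1 hc)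
      exact ⟨m, hm, this⟩
    have hA := pvTrajHit X A cn hpc hmin A.length 0 (by omega) le_rfl (by omega) hprobe
    have hB := pvAltSome X A cn hpc hmin A [] rfl (by simp) hcnlt
    rw [← pvSetRange X] at hA hB
    simp only [solution]
    rw [hA]
    exact hB.symm
  · -- no covering prefix: both return -1
    have hall : ∀ k : Nat, k < A.length → ¬ pvP X A k := by
      intro k hk hp
      exact hex ⟨k, List.mem_range.2 hk, (pvCovers_iff X A k).2 hp⟩
    have hdead := pvDead X A A.length 0 (A.length : Int) (by omega) (by
      intro mid hm1 hm2
      rw [pvTest_iff X A mid hm1]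
      exact hall mid.toNat (by omega))
    have hB := pvAltNone X A hall A [] rfl
    rw [← pvSetRange X] at hdead hB
    simp only [solution]
    rw [hdead]
    exact hB.symm

theorem solution_changed : Claim_changed_solution := by
  unfold Claim_changed_solution; decide

theorem solution_tight : Claim_exact_solution := by
  intro X A _hDom hD
  obtain ⟨hex, hfail⟩ := hD
  have hex' : ∃ k : Nat, k < A.length ∧ pvCovers X A k := by
    obtain ⟨k, hk, hc⟩ := hex; exact ⟨k, List.mem_range.1 hk, hc⟩
  haveI : DecidablePred (fun k => k < A.length ∧ pvCovers X A k) := fun k => by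
    unfold pvCovers; infer_instance
  set cn := Nat.find hex' with hcn
  obtain ⟨hcnlt, hcnc⟩ := Nat.find_spec hex'
  have hpc : pvP X A cn := (pvCovers_iff X A cn).1 hcnc
  have hmin : ∀ k < cn, ¬ pvP X A k := by
    intro k hk hp
    exact Nat.find_min hex' hk ⟨by omega, (pvCovers_iff X A k).2 hp⟩
  have hnoprobe : ∀ m ∈ pvProbes A.length 0 (A.length : Int), ¬ ((cn : Int) ≤ m ∧ pvSafe X A m) := by
    rintro m hm ⟨hcle, hs⟩
    have hb := pvProbes_mem A.length 0 _ m hm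
    exact hfail m hm ((pvCovers_iff X A m.toNat).2
      ((pvP_iff X A cn hpc hmin m (by omega)).2 ⟨hcle, hs⟩))
  have hA := pvTrajMiss X A cn hpc hmin A.length 0 (by omega) le_rfl hnoprobe
  have hB := pvAltSome X A cn hpc hmin A [] rfl (by simp) hcnlt
  rw [← pvSetRange X] at hA hB
  have hB' : solution_alt X A = (cn : Int) := hB
  simp only [solution]
  rw [hA, hB']
  show (-1 : Int) ≠ (cn : Int)
  omega
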